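-- pv_equiv track=rewrite | github.com/clover3/Chair | src/dataset_specific/msmarco/multiple_tokenize_worker.py | crop_to_space
-- ===== SOURCE A (Python) =====
-- def crop_to_space(text, max_char):
--     if len(text) <= max_char:
--         return text
--     last_space = -1
--     for i in range(max_char):
--         if text[i] == ' ':
--             last_space = i
--
--
--     if last_space == -1:
--         return text[:max_char]
--     else:
--         return text[:last_space]
-- ===== SOURCE B (Python) =====
-- def crop_to_space(text, max_char):
--     if len(text) <= max_char:
--         return text
--     head = text[:max_char]
--     pieces = head.split(' ')
--     if len(pieces) == 1:
--         return head
--     return ' '.join(pieces[:-1])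
-- ===== Notes on version B (the rewrite author's own statement) =====
-- stated objective: alternative
-- what changed: Instead of scanning indices for the last space and slicing at it, B splits the budgeted prefix into space-separated pieces and reconstructs the result by rejoining all pieces but the last; no character index is ever computed.
-- outside the precondition, e.g. on crop_to_space('a b', -1): A returns 'a ', B returns 'a'
import Mathlib
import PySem

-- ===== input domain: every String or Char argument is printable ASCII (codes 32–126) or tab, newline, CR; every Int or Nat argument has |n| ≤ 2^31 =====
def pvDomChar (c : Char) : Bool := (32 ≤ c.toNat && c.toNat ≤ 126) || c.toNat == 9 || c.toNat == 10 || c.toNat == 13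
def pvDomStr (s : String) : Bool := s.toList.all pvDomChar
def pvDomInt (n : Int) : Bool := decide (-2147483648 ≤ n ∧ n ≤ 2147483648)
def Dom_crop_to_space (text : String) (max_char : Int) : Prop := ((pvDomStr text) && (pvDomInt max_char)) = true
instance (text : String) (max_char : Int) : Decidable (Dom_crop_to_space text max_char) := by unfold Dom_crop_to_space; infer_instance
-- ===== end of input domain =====

-- B replaces A's index scan for the last space by splitting the budgeted prefix on spaces and
-- rejoining all pieces but the last (no character index is computed); objective: alternative.

-- ===== PORT A =====
def crop_to_space (text : String) (max_char : Int) : String :=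
  if PySem.Str.len text ≤ max_char then text
  else
    -- for i in range(max_char): if text[i] == ' ': last_space = i
    -- (inside Pre_, 0 ≤ i < max_char < len(text), so text[i] never raises; pyGetD is exact here)
    let last_space : Int :=
      (PySem.List.pyRange 0 max_char 1).foldl
        (fun ls i => if PySem.List.pyGetD text.toList i ' ' = ' ' then i else ls) (-1)
    if last_space = -1 then PySem.Str.slice text none (some max_char)
    else PySem.Str.slice text none (some last_space)

-- ===== PORT B =====
def crop_to_space_alt (text : String) (max_char : Int) : String :=
  if PySem.Str.len text ≤ max_char then text
  else
    let head := PySem.Chars.slice text.toList none (some max_char)   -- head = text[:max_char]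
    let pieces := PySem.Chars.splitOn head [' ']                     -- pieces = head.split(' ')
    if pieces.length = 1 then String.ofList head
    else String.ofList (PySem.Chars.join [' '] (PySem.List.slice pieces none (some (-1))))  -- ' '.join(pieces[:-1])

-- ===== PRECONDITION & SPEC =====
-- Pre_ excludes only the unspecified corner of a negative character budget whose tail slice
-- text[:max_char] contains a space: there A's scan range(max_char) is empty and A returns that
-- slice unexamined, while B still cuts it at its last space; negative budgets whose slice has
-- no space (and all nonnegative budgets) are inside the claim.
def Pre_crop_to_space (text : String) (max_char : Int) : Prop :=
  0 ≤ max_char ∨ ¬ (' ' ∈ PySem.Chars.slice text.toList none (some max_char))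
instance (text : String) (max_char : Int) : Decidable (Pre_crop_to_space text max_char) := by unfold Pre_crop_to_space; infer_instance
def pvWitness_crop_to_space : String × Int := ("hello world out", 8)

def Spec_crop_to_space (text : String) (max_char : Int) (out : String) : Prop := out = crop_to_space_alt text max_char
instance (text : String) (max_char : Int) (out : String) : Decidable (Spec_crop_to_space text max_char out) := by unfold Spec_crop_to_space; infer_instance

-- ===== CLAIM (what is proved, stated in full; the proofs are below) =====
def Claim_equal_crop_to_space : Prop := ∀ (text : String) (max_char : Int), Dom_crop_to_space text max_char → Pre_crop_to_space text max_char → Spec_crop_to_space text max_char (crop_to_space text max_char)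

-- ===== LEMMAS AND PROOFS =====

-- [' '] is a prefix of l iff l starts with ' '
theorem prefixOf_space (l : List Char) : [' '].isPrefixOf l = (l.head? == some ' ') := by
  cases l with
  | nil => simp [List.isPrefixOf]
  | cons a as => simp [List.isPrefixOf, eq_comm]

-- appending a non-space character does not change rfind.go below the old length
theorem rfind_go_concat (xs : List Char) (c : Char) (hc : c ≠ ' ') :
    ∀ j, j ≤ xs.length →
      PySem.Chars.rfind.go (xs ++ [c]) [' '] j = PySem.Chars.rfind.go xs [' '] j := by
  intro j
  induction j with
  | zero =>
    intro _
    simp only [PySem.Chars.rfind.go, prefixOf_space, List.head?_append]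
    cases hx : xs.head? with
    | none => simp [hc]
    | some a => simp
  | succ k ih =>
    intro hj
    have hd : (xs ++ [c]).drop (k+1) = xs.drop (k+1) ++ [c] := by
      rw [List.drop_append_of_le_length (by omega)]
    simp only [PySem.Chars.rfind.go, hd, prefixOf_space, List.head?_append]
    have ihk := ih (by omega)
    cases hx : (xs.drop (k+1)).head? with
    | none => simp [hc, ihk]
    | some a => simp [ihk]

-- rfind on a one-longer prefix: the new character either is the answer or is invisible
theorem rfind_concat (xs : List Char) (c : Char) :
    PySem.Chars.rfind (xs ++ [c]) [' ']
      = if c = ' ' then (xs.length : Int) else PySem.Chars.rfind xs [' '] := by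
  have hlen : (xs ++ [c]).length = xs.length + 1 := by simp
  have hdropfull : (xs ++ [c]).drop (xs.length + 1) = [] := by
    apply List.drop_eq_nil_of_le; simp
  have hdrop : (xs ++ [c]).drop xs.length = [c] := by
    simp
  unfold PySem.Chars.rfind
  rw [hlen]
  rw [show PySem.Chars.rfind.go (xs ++ [c]) [' '] (xs.length + 1)
        = if [' '].isPrefixOf ((xs ++ [c]).drop (xs.length + 1)) then ((xs.length : Int)+1)
          else PySem.Chars.rfind.go (xs ++ [c]) [' '] xs.length from by
        simp [PySem.Chars.rfind.go]]
  rw [hdropfull]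
  rw [if_neg (by simp)]
  by_cases hc : c = ' '
  · subst hc
    cases hn : xs.length with
    | zero =>
      have hxs : xs = [] := List.eq_nil_of_length_eq_zero hn
      subst hxs
      simp [PySem.Chars.rfind.go]
    | succ k =>
      have : (xs ++ [' ']).drop (k+1) = [' '] := by rw [← hn]; simp [hdrop]
      simp only [PySem.Chars.rfind.go, this, prefixOf_space]
      simp
  · rw [if_neg hc]
    cases hn : xs.length with
    | zero =>
      have hxs : xs = [] := List.eq_nil_of_length_eq_zero hn
      subst hxs
      simp [PySem.Chars.rfind.go]
      exact fun h => hc h.symm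
    | succ k =>
      have hd : (xs ++ [c]).drop (k+1) = [c] := by rw [← hn]; simp [hdrop]
      have hx : xs.drop (k+1) = [] := by apply List.drop_eq_nil_of_le; omega
      simp only [PySem.Chars.rfind.go, hd, hx, prefixOf_space]
      simp only [List.head?_cons, List.head?_nil]
      rw [if_neg (by simp [hc]), if_neg (by simp)]
      exact rfind_go_concat xs c hc k (by omega)

-- A's scan state after n steps
def lastSpaceFold (l : List Char) (n : Int) : Int :=
  (PySem.List.pyRange 0 n 1).foldl
    (fun ls i => if PySem.List.pyGetD l i ' ' = ' ' then i else ls) (-1)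

theorem lastSpaceFold_succ (l : List Char) (n : Nat) :
    lastSpaceFold l ((n : Int) + 1)
      = if PySem.List.pyGetD l (n : Int) ' ' = ' ' then (n : Int) else lastSpaceFold l n := by
  unfold lastSpaceFold
  rw [PySem.List.pyRange_one_succ_right (show (0:Int) ≤ (n:Int) by omega), List.foldl_append]
  simp

theorem lastSpaceFold_bounds (l : List Char) (n : Nat) :
    lastSpaceFold l n = -1 ∨ (0 ≤ lastSpaceFold l n ∧ lastSpaceFold l n < n) := by
  induction n with
  | zero => left; simp [lastSpaceFold, PySem.List.pyRange_one_eq_nil]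
  | succ k ih =>
    rw [show ((k+1 : Nat) : Int) = (k : Int) + 1 by push_cast; ring, lastSpaceFold_succ]
    split
    · right; omega
    · rcases ih with h | ⟨h1, h2⟩
      · left; exact h
      · right; omega

-- the scan over the first n characters computes rfind of the n-character prefix
theorem lastSpaceFold_eq_rfind (l : List Char) (n : Nat) (h : n ≤ l.length) :
    lastSpaceFold l n = PySem.Chars.rfind (l.take n) [' '] := by
  induction n with
  | zero =>
    simp [lastSpaceFold, PySem.List.pyRange_one_eq_nil, PySem.Chars.rfind,
      PySem.Chars.rfind.go, List.isPrefixOf]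
  | succ k ih =>
    have hk : k < l.length := by omega
    have htake : l.take (k+1) = l.take k ++ [l[k]] := by
      rw [List.take_add_one]; simp [List.getElem?_eq_getElem hk]
    rw [show ((k+1 : Nat) : Int) = (k : Int) + 1 by push_cast; ring, lastSpaceFold_succ,
      htake, rfind_concat]
    have hlen : (l.take k).length = k := by simp; omega
    have hget : PySem.List.pyGetD l (k : Int) ' ' = l[k] := by
      rw [PySem.List.pyGetD_natCast]
      exact List.getD_eq_getElem l ' ' hk
    rw [hlen, hget, ih (by omega)]

-- rfind finds nothing when the character does not occur
theorem rfind_go_space_not_mem (s : List Char) (h : ' ' ∉ s) :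
    ∀ j, PySem.Chars.rfind.go s [' '] j = -1 := by
  intro j
  induction j with
  | zero =>
    simp only [PySem.Chars.rfind.go, prefixOf_space]
    rw [if_neg]
    simp only [beq_iff_eq]
    intro hh
    exact h (List.mem_of_mem_head? hh)
  | succ k ih =>
    simp only [PySem.Chars.rfind.go, prefixOf_space]
    rw [if_neg, ih]
    simp only [beq_iff_eq]
    intro hh
    exact h (List.drop_subset (k+1) s (List.mem_of_mem_head? hh))

theorem rfind_space_not_mem (s : List Char) (h : ' ' ∉ s) :
    PySem.Chars.rfind s [' '] = -1 := by
  unfold PySem.Chars.rfind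
  exact rfind_go_space_not_mem s h _

-- ---- B-side: splitOn [' '] as a simple structural recursion ----
def splitSimple : List Char → List Char → List (List Char)
  | [], cur => [cur.reverse]
  | c :: rest, cur => if c = ' ' then cur.reverse :: splitSimple rest [] else splitSimple rest (c :: cur)

theorem splitOn_go_eq (l : List Char) : ∀ (cur : List Char) (acc : List (List Char)) (fuel : Nat),
    l.length < fuel →
    PySem.Chars.splitOn.go [' '] fuel l cur acc = acc.reverse ++ splitSimple l cur := by
  induction l with
  | nil =>
    intro cur acc fuel hf
    cases fuel with
    | zero => omega
    | succ f => simp [PySem.Chars.splitOn.go, splitSimple]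
  | cons c rest ih =>
    intro cur acc fuel hf
    cases fuel with
    | zero => omega
    | succ f =>
      simp only [PySem.Chars.splitOn.go, prefixOf_space, List.head?_cons]
      by_cases hc : c = ' '
      · subst hc
        rw [if_pos (by simp)]
        rw [show ((' ' :: rest).drop [' '].length) = rest from rfl]
        rw [ih [] (cur.reverse :: acc) f (by simp at hf; omega)]
        simp [splitSimple]
      · rw [if_neg (by simp [hc])]
        rw [ih (c :: cur) acc f (by simp at hf; omega)]
        simp [splitSimple, hc]

theorem splitOn_eq (cs : List Char) :
    PySem.Chars.splitOn cs [' '] = splitSimple cs [] := by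
  unfold PySem.Chars.splitOn
  rw [splitOn_go_eq cs [] [] (cs.length + 1) (by omega)]
  simp

theorem splitSimple_ne_nil (l cur : List Char) : splitSimple l cur ≠ [] := by
  induction l generalizing cur with
  | nil => simp [splitSimple]
  | cons c rest ih =>
    simp only [splitSimple]
    split
    · simp
    · exact ih _

theorem join_cons_ne (p : List Char) (ps : List (List Char)) (h : ps ≠ []) :
    PySem.Chars.join [' '] (p :: ps) = p ++ [' '] ++ PySem.Chars.join [' '] ps := by
  cases ps with
  | nil => exact absurd rfl h
  | cons q rest => exact PySem.Chars.join_cons_cons [' '] p q rest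

-- rejoining the split pieces recovers the string
theorem join_splitSimple (l cur : List Char) :
    PySem.Chars.join [' '] (splitSimple l cur) = cur.reverse ++ l := by
  induction l generalizing cur with
  | nil => simp [splitSimple, PySem.Chars.join_singleton]
  | cons c rest ih =>
    simp only [splitSimple]
    by_cases hc : c = ' '
    · subst hc
      rw [if_pos rfl, join_cons_ne _ _ (splitSimple_ne_nil rest []), ih []]
      simp
    · rw [if_neg hc, ih (c :: cur)]
      simp

theorem splitSimple_snoc_space (xs : List Char) : ∀ cur,
    splitSimple (xs ++ [' ']) cur = splitSimple xs cur ++ [[]] := by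
  induction xs with
  | nil => intro cur; simp [splitSimple]
  | cons c rest ih =>
    intro cur
    simp only [List.cons_append, splitSimple]
    by_cases hc : c = ' '
    · subst hc; rw [if_pos rfl, if_pos rfl, ih []]; simp
    · rw [if_neg hc, if_neg hc, ih (c :: cur)]

theorem splitSimple_snoc_ne (c : Char) (hc : c ≠ ' ') (xs : List Char) : ∀ cur,
    splitSimple (xs ++ [c]) cur
      = (splitSimple xs cur).dropLast ++ [(splitSimple xs cur).getLastD [] ++ [c]] := by
  induction xs with
  | nil => intro cur; simp [splitSimple, hc]
  | cons a rest ih =>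
    intro cur
    simp only [List.cons_append, splitSimple]
    by_cases ha : a = ' '
    · subst ha
      rw [if_pos rfl, if_pos rfl, ih []]
      rcases hS : splitSimple rest [] with _ | ⟨s, S'⟩
      · exact absurd hS (splitSimple_ne_nil rest [])
      · simp
    · rw [if_neg ha, if_neg ha, ih (a :: cur)]

-- the split/rejoin reconstruction agrees with the last-space characterisation
theorem split_main (cs : List Char) :
    (PySem.Chars.rfind cs [' '] = -1 → splitSimple cs [] = [cs]) ∧
    (0 ≤ PySem.Chars.rfind cs [' '] →
      (splitSimple cs []).length ≠ 1 ∧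
      PySem.Chars.join [' '] (splitSimple cs []).dropLast
        = cs.take (PySem.Chars.rfind cs [' ']).toNat) := by
  induction cs using List.reverseRecOn with
  | nil =>
    have h0 : PySem.Chars.rfind ([] : List Char) [' '] = -1 :=
      rfind_space_not_mem [] (by simp)
    constructor
    · intro _; simp [splitSimple]
    · intro h; rw [h0] at h; omega
  | append_singleton xs c ih =>
    obtain ⟨ih1, ih2⟩ := ih
    rw [rfind_concat]
    by_cases hc : c = ' '
    · subst hc
      rw [if_pos rfl]
      constructor
      · intro h; omega
      · intro _
        rw [splitSimple_snoc_space]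
        refine ⟨?_, ?_⟩
        · have hne := splitSimple_ne_nil xs []
          have h0 : (splitSimple xs []).length ≠ 0 := by
            intro h; exact hne (List.length_eq_zero_iff.mp h)
          simp only [List.length_append, List.length_cons, List.length_nil]
          omega
        rw [List.dropLast_concat, join_splitSimple]
        simp [List.take_left']
    · rw [if_neg hc]
      have hb : PySem.Chars.rfind xs [' '] = -1 ∨
          (0 ≤ PySem.Chars.rfind xs [' '] ∧ PySem.Chars.rfind xs [' '] < xs.length) := by
        have h1 := lastSpaceFold_bounds xs xs.length
        have h2 := lastSpaceFold_eq_rfind xs xs.length (le_refl _)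
        rw [List.take_length] at h2
        rw [← h2]; exact h1
      constructor
      · intro h
        rw [splitSimple_snoc_ne c hc, ih1 h]
        simp
      · intro h
        have hge : 0 ≤ PySem.Chars.rfind xs [' '] := h
        obtain ⟨hlen1, hjoin⟩ := ih2 hge
        have hlt : PySem.Chars.rfind xs [' '] < xs.length := by
          rcases hb with hb | hb
          · omega
          · exact hb.2
        rw [splitSimple_snoc_ne c hc]
        have hne := splitSimple_ne_nil xs []
        constructor
        · have : (splitSimple xs []).length ≥ 2 := by
            have : (splitSimple xs []).length ≥ 1 := by
              cases hS : splitSimple xs [] with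
              | nil => exact absurd hS hne
              | cons s S' => simp
            omega
          simp only [List.length_append, List.length_dropLast, List.length_cons, List.length_nil]
          omega
        · rw [List.dropLast_concat, hjoin, List.take_append_of_le_length (by omega)]

-- ===== VERDICT (by name: the statement is the Claim_ definition above) =====
theorem crop_to_space_spec : Claim_equal_crop_to_space := by
  intro text max_char _ hpre
  unfold Spec_crop_to_space crop_to_space crop_to_space_alt
  dsimp only
  by_cases hpos : 0 ≤ max_char
  case neg =>
    -- negative budget: A's scan is empty; B's split of the slice is a single piece (Pre_), both return text[:max_char]
    have hns : ¬ (' ' ∈ PySem.Chars.slice text.toList none (some max_char)) :=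
      hpre.resolve_left hpos
    have hlen : (PySem.Str.len text) = (text.toList.length : Int) := PySem.Str.len_eq text
    rw [hlen]
    have hgt : ¬ ((text.toList.length : Int) ≤ max_char) := by omega
    rw [if_neg hgt, if_neg hgt]
    rw [PySem.List.pyRange_one_eq_nil (by omega), List.foldl_nil, if_pos rfl]
    have h1 : splitSimple (PySem.Chars.slice text.toList none (some max_char)) []
        = [PySem.Chars.slice text.toList none (some max_char)] :=
      (split_main _).1 (rfind_space_not_mem _ hns)
    rw [splitOn_eq, h1]
    rw [if_pos (by simp)]
    rfl
  case pos =>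
  obtain ⟨n, hn⟩ : ∃ n : Nat, max_char = (n : Int) :=
    ⟨max_char.toNat, (Int.toNat_of_nonneg hpos).symm⟩
  subst hn
  by_cases hle : PySem.Str.len text ≤ (n : Int)
  · rw [if_pos hle, if_pos hle]
  · rw [if_neg hle, if_neg hle]
    set l := text.toList with hl
    have hfold : (PySem.List.pyRange 0 (n : Int) 1).foldl
        (fun ls i => if PySem.List.pyGetD l i ' ' = ' ' then i else ls) (-1)
        = lastSpaceFold l (n : Int) := rfl
    rw [hfold]
    have hlen : (PySem.Str.len text) = (l.length : Int) := PySem.Str.len_eq text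
    have hnl : n ≤ l.length := by omega
    have hhead : PySem.Chars.slice l none (some ((n : Nat) : Int)) = l.take n :=
      PySem.List.slice_to_natCast l n
    have hls : lastSpaceFold l (n : Int) = PySem.Chars.rfind (l.take n) [' '] :=
      lastSpaceFold_eq_rfind l n hnl
    rcases lastSpaceFold_bounds l n with hb | ⟨hb1, hb2⟩
    · -- no space in the prefix: split yields one piece, both return text[:max_char]
      rw [if_pos hb]
      have h1 : splitSimple (PySem.Chars.slice l none (some ((n : Nat) : Int))) []
          = [PySem.Chars.slice l none (some ((n : Nat) : Int))] := by
        apply (split_main _).1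
        rw [hhead, ← hls]; exact hb
      rw [splitOn_eq, h1, if_pos (by simp)]
      rfl
    · -- a space exists: B's rejoin of all pieces but the last is A's slice at last_space
      rw [if_neg (by omega)]
      obtain ⟨hlen1, hjoin⟩ := (split_main (l.take n)).2 (by rw [← hls]; omega)
      rw [splitOn_eq, hhead]
      rw [if_neg hlen1]
      simp only [PySem.Str.slice, PySem.List.slice_to_neg_one]
      congr 1
      rw [hjoin, ← hls]
      have e1 : PySem.Chars.slice l none (some (lastSpaceFold l ((n : Nat) : Int)))
          = l.take (lastSpaceFold l ((n : Nat) : Int)).toNat :=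
        PySem.List.slice_to l hb1
      rw [e1, List.take_take]
      congr 1
      omega
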